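-- pv_equiv track=rewrite | github.com/jamesengleback/vde | analysis/moclv-fitness-improvement.py | generation_num
-- ===== SOURCE A (Python) =====
-- def generation_num(idx):
--     # ffs
--     l = []
--     counter = 0
--     last = 0
--     for i in idx:
--         if i < last:
--             counter += 1
--         l.append(counter)
--         last = i
--     return l
-- ===== SOURCE B (Python) =====
-- def generation_num(idx):
--     seq = list(idx)
--     prev = [0] + seq[:-1]
--     ind = [1 if c < p else 0 for c, p in zip(seq, prev)]
--     out = []
--     total = 0
--     for x in ind:
--         total = x + total
--         out.append(total)
--     return out
-- ===== Notes on version B (the rewrite author's own statement) =====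
-- stated objective: alternative
-- what changed: Splits A's single interleaved loop (running counter + last tracker) into two passes: first a zip-with-predecessor indicator list marking each decrease, then a prefix-sum pass accumulating it.
import Mathlib
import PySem

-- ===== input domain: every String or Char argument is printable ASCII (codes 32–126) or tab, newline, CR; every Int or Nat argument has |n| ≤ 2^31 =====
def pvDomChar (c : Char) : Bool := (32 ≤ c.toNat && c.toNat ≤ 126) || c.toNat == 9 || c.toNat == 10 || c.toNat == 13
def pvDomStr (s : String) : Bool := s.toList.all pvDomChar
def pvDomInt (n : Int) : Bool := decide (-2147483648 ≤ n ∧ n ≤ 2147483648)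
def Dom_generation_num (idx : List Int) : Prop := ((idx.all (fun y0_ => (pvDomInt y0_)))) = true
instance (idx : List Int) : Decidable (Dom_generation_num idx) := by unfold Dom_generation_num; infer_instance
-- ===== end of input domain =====

-- B replaces A's interleaved running-counter loop by an indicator list (zip with predecessor) followed by a prefix-sum pass (alternative decomposition, same cost).


-- ===== PORT A =====
-- A: one loop carrying (l, counter, last); counter bumps when i < last, appended each step.
def generation_num (idx : List Int) : List Int :=
  (idx.foldl (fun (s : List Int × Int × Int) i =>
      let counter := if i < s.2.2 then s.2.1 + 1 else s.2.1
      (s.1 ++ [counter], counter, i)) ([], 0, 0)).1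

-- ===== PORT B =====
-- B: prev = [0] + seq[:-1]; indicators; prefix sum.
def generation_num_alt (idx : List Int) : List Int :=
  let seq := idx
  let prev := 0 :: seq.dropLast
  let ind := (seq.zip prev).map (fun p => if p.1 < p.2 then (1 : Int) else 0)
  (ind.foldl (fun (s : List Int × Int) x => (s.1 ++ [x + s.2], x + s.2)) ([], 0)).1

-- ===== PRECONDITION & SPEC =====
def Spec_generation_num (idx : List Int) (out : List Int) : Prop := out = generation_num_alt idx
instance (idx : List Int) (out : List Int) : Decidable (Spec_generation_num idx out) := by unfold Spec_generation_num; infer_instance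

-- ===== CLAIM (what is proved, stated in full; the proofs are below) =====
def Claim_equal_generation_num : Prop := ∀ (idx : List Int), Dom_generation_num idx → Spec_generation_num idx (generation_num idx)

-- ===== LEMMAS AND PROOFS =====
theorem zip_prev_cons (x last : Int) (xs : List Int) :
    (x :: xs).zip (last :: (x :: xs).dropLast) = (x, last) :: xs.zip (x :: xs.dropLast) := by
  cases xs <;> simp [List.dropLast]

theorem gen_main (xs : List Int) (last c : Int) (acc : List Int) :
    (xs.foldl (fun (s : List Int × Int × Int) i =>
        let counter := if i < s.2.2 then s.2.1 + 1 else s.2.1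
        (s.1 ++ [counter], counter, i)) (acc, c, last)).1 =
    (((xs.zip (last :: xs.dropLast)).map (fun p => if p.1 < p.2 then (1 : Int) else 0)).foldl
        (fun (s : List Int × Int) x => (s.1 ++ [x + s.2], x + s.2)) (acc, c)).1 := by
  induction xs generalizing last c acc with
  | nil => simp
  | cons x xs ih =>
    rw [zip_prev_cons]
    simp only [List.foldl_cons, List.map_cons]
    by_cases h : x < last
    · simpa [h, add_comm] using ih x (c + 1) (acc ++ [c + 1])
    · simpa [h] using ih x c (acc ++ [c])

-- ===== VERDICT (by name: the statement is the Claim_ definition above) =====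
theorem generation_num_spec : Claim_equal_generation_num := by
  intro idx _
  unfold Spec_generation_num generation_num generation_num_alt
  exact gen_main idx 0 0 []
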